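-- pv_equiv track=rewrite | github.com/dinodeep/Advent21 | day13/part1.py | horizfold
-- ===== SOURCE A (Python) =====
-- def horizfold(board, idx):
--     n = len(board)
--     m = len(board[0])
--
--     # out of range fold
--     if idx < 0 or n <= idx:
--         return board
--
--     board[idx] = [2] * m
--
--     # fold occurs on some row in the board
--     # for each dot in portion of board below fold, move it up if it fits
--     for i in range(idx + 1, n):
--         for j in range(m):
--             dist = i - idx
--             if board[i][j] == 1 and 0 <= idx - dist:
--                 board[idx - dist][j] = 1
--
--     # return board before fold
--     newboard = [board[i] for i in range(idx)]
--     return newboard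
-- ===== SOURCE B (Python) =====
-- def horizfold(board, idx):
--     # Pure gather: each output row r takes dots from its unique mirror row 2*idx - r.
--     # (Unlike A, this does not mutate `board`; return value is identical on the stated domain.)
--     n = len(board)
--     m = len(board[0])
--     if idx < 0 or n <= idx:
--         return board
--     return [[1 if (2 * idx - r < n and board[2 * idx - r][j] == 1) else board[r][j]
--              for j in range(m)]
--             for r in range(idx)]
-- ===== Notes on version B (the rewrite author's own statement) =====
-- stated objective: simpler
-- what changed: B replaces A's in-place scatter (iterating rows below the fold and writing dots upward into the mutated board) with a pure gather comprehension that computes each output cell from its unique mirror source row, never mutating the board.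
-- outside the precondition, e.g. on horizfold([[0], [5, 5], [0]], 2): A returns [[0], [5, 5]], B returns [[0], [5]]
import Mathlib
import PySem

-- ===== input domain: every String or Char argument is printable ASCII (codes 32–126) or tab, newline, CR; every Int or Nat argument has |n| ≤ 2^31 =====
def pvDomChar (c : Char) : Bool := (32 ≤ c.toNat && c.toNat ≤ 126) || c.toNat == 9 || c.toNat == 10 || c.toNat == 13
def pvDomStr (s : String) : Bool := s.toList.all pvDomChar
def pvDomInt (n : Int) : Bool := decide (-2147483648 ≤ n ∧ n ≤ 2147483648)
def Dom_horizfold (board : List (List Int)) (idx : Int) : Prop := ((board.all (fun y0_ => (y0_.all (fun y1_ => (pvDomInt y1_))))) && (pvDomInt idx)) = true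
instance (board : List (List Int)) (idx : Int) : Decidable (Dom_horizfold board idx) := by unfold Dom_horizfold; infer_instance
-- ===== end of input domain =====

-- B replaces A's in-place scatter over rows below the fold by a pure gather from each output
-- row's unique mirror row (objective: simpler).  A mutates `board` in place; B does not — the
-- equivalence proved here is about the RETURN value only.

-- ===== PORT A =====
-- body of A's inner `for j in range(m)` loop
def pvAInner (idx i : Int) (b : List (List Int)) (j : Int) : List (List Int) :=
  let dist := i - idx
  if PySem.List.pyGetD (PySem.List.pyGetD b i []) j 0 = 1 ∧ 0 ≤ idx - dist then
    PySem.List.pySetD b (idx - dist) (PySem.List.pySetD (PySem.List.pyGetD b (idx - dist) []) j 1)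
  else b

-- body of A's outer `for i in range(idx+1, n)` loop
def pvAOuter (idx m : Int) (b : List (List Int)) (i : Int) : List (List Int) :=
  (PySem.List.pyRange 0 m 1).foldl (pvAInner idx i) b

def horizfold (board : List (List Int)) (idx : Int) : List (List Int) :=
  let n : Int := board.length
  let m : Int := ((PySem.List.pyGetD board 0 []).length : Int)
  if idx < 0 ∨ n ≤ idx then board
  else
    let b1 := (PySem.List.pyRange (idx + 1) n 1).foldl (pvAOuter idx m)
      (PySem.List.pySetD board idx (List.replicate m.toNat 2))
    (PySem.List.pyRange 0 idx 1).map (fun r => PySem.List.pyGetD b1 r [])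

-- ===== PORT B =====
-- one output row of B's comprehension
def pvBRow (board : List (List Int)) (idx m : Int) (r : Int) : List Int :=
  (PySem.List.pyRange 0 m 1).map (fun j =>
    if 2 * idx - r < (board.length : Int) ∧
        PySem.List.pyGetD (PySem.List.pyGetD board (2 * idx - r) []) j 0 = 1
    then 1 else PySem.List.pyGetD (PySem.List.pyGetD board r []) j 0)

def horizfold_alt (board : List (List Int)) (idx : Int) : List (List Int) :=
  let n : Int := board.length
  let m : Int := ((PySem.List.pyGetD board 0 []).length : Int)
  if idx < 0 ∨ n ≤ idx then board
  else (PySem.List.pyRange 0 idx 1).map (pvBRow board idx m)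

-- ===== PRECONDITION & SPEC =====
-- Pre_ excludes the empty board (A raises IndexError at `board[0]`) and, for an in-range fold
-- index, ragged boards: there A either raises IndexError or accidentally returns upper rows
-- longer than `m` untrimmed, a quirk of mutating rows in place (see the cite in claim.json).
def Pre_horizfold (board : List (List Int)) (idx : Int) : Prop :=
  board ≠ [] ∧ (0 ≤ idx → idx < (board.length : Int) →
    ∀ row ∈ board, row.length = (board.headD []).length)
instance (board : List (List Int)) (idx : Int) : Decidable (Pre_horizfold board idx) := by
  unfold Pre_horizfold; infer_instance

def pvWitness_horizfold : List (List Int) × Int := ([[1, 0], [0, 1], [1, 1]], 1)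

def Spec_horizfold (board : List (List Int)) (idx : Int) (out : List (List Int)) : Prop :=
  out = horizfold_alt board idx
instance (board : List (List Int)) (idx : Int) (out : List (List Int)) :
    Decidable (Spec_horizfold board idx out) := by unfold Spec_horizfold; infer_instance

-- ===== CLAIM (what is proved, stated in full; the proofs are below) =====
def Claim_equal_horizfold : Prop := ∀ (board : List (List Int)) (idx : Int),
  Dom_horizfold board idx → Pre_horizfold board idx →
  Spec_horizfold board idx (horizfold board idx)

-- ===== LEMMAS AND PROOFS =====

-- `pyGetD` of a nonnegative Int index, in Nat form
theorem pvGetD_nonneg {α : Type} (xs : List α) (i : Int) (d : α) (h : 0 ≤ i) :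
    PySem.List.pyGetD xs i d = xs.getD i.toNat d := by
  have h2 : i = ((i.toNat : Nat) : Int) := by omega
  conv_lhs => rw [h2]
  rw [PySem.List.pyGetD_natCast]

theorem pvGetSet_self {α : Type} (b : List α) (r : Int) (v : α) (d : α)
    (h0 : 0 ≤ r) (h : r.toNat < b.length) :
    PySem.List.pyGetD (PySem.List.pySetD b r v) r d = v := by
  rw [PySem.List.pySetD_of_nonneg _ _ h0, pvGetD_nonneg _ _ _ h0]
  simp [List.getD, h]

theorem pvGetSet_other {α : Type} (b : List α) (r t : Int) (v : α) (d : α)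
    (h0 : 0 ≤ t) (hr : 0 ≤ r) (hne : t ≠ r) :
    PySem.List.pyGetD (PySem.List.pySetD b r v) t d = PySem.List.pyGetD b t d := by
  rw [PySem.List.pySetD_of_nonneg _ _ hr, pvGetD_nonneg _ _ _ h0, pvGetD_nonneg _ _ _ h0]
  have hne' : r.toNat ≠ t.toNat := by omega
  simp [List.getD, List.getElem?_set_ne hne']

theorem pvFoldl_len {α : Type} (f : List α → Int → List α)
    (h : ∀ b x, (f b x).length = b.length) :
    ∀ (l : List Int) (b : List α), (l.foldl f b).length = b.length := by
  intro l
  induction l with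
  | nil => intro b; rfl
  | cons x l ih => intro b; simp only [List.foldl_cons]; rw [ih, h]

theorem pvAInner_eq (idx i : Int) (b : List (List Int)) (j : Int) :
    pvAInner idx i b j =
      if PySem.List.pyGetD (PySem.List.pyGetD b i []) j 0 = 1 ∧ 0 ≤ idx - (i - idx) then
        PySem.List.pySetD b (idx - (i - idx))
          (PySem.List.pySetD (PySem.List.pyGetD b (idx - (i - idx)) []) j 1)
      else b := rfl

theorem pvAInner_len (idx i : Int) (b : List (List Int)) (j : Int) :
    (pvAInner idx i b j).length = b.length := by
  rw [pvAInner_eq]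
  split
  · exact PySem.List.length_pySetD _ _ _
  · rfl

theorem pvAOuter_len (idx m : Int) (b : List (List Int)) (i : Int) :
    (pvAOuter idx m b i).length = b.length :=
  pvFoldl_len _ (fun b j => pvAInner_len idx i b j) _ b

-- rows other than the write target are untouched by the inner loop
theorem pvInner_other (idx i t : Int) (h0 : 0 ≤ t) (hne : t ≠ 2 * idx - i) :
    ∀ (js : List Int) (b : List (List Int)),
      PySem.List.pyGetD (js.foldl (pvAInner idx i) b) t [] = PySem.List.pyGetD b t [] := by
  intro js
  induction js with
  | nil => intro b; rfl
  | cons j js ih =>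
    intro b
    simp only [List.foldl_cons]
    rw [ih]
    rw [pvAInner_eq]
    split
    · next h =>
      have hr : 0 ≤ idx - (i - idx) := h.2
      exact pvGetSet_other _ _ _ _ _ h0 hr (by omega)
    · rfl

-- the accumulated value of the target row, as a row-level fold
def pvRowFold (src : List Int) (js : List Int) (row : List Int) : List Int :=
  js.foldl (fun row j =>
    if PySem.List.pyGetD src j 0 = 1 then PySem.List.pySetD row j 1 else row) row

theorem pvInner_target (idx i : Int) (hii : idx < i) (h0 : 0 ≤ 2 * idx - i) :
    ∀ (js : List Int) (b : List (List Int)) (src : List Int),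
      PySem.List.pyGetD b i [] = src → (2 * idx - i).toNat < b.length →
      PySem.List.pyGetD (js.foldl (pvAInner idx i) b) (2 * idx - i) [] =
        pvRowFold src js (PySem.List.pyGetD b (2 * idx - i) []) := by
  intro js
  induction js with
  | nil => intro b src _ _; rfl
  | cons j js ih =>
    intro b src hsrc hlen
    have hi0 : (0:Int) ≤ i := by omega
    have hine : i ≠ 2 * idx - i := by omega
    simp only [List.foldl_cons]
    have hsrc' : PySem.List.pyGetD (pvAInner idx i b j) i [] = src := by
      rw [pvAInner_eq]
      split
      · next h => rw [pvGetSet_other _ _ _ _ _ hi0 h.2 (by omega)]; exact hsrc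
      · exact hsrc
    have hlen' : (2 * idx - i).toNat < (pvAInner idx i b j).length := by
      rw [pvAInner_len]; exact hlen
    rw [ih _ _ hsrc' hlen']
    rw [pvAInner_eq]
    unfold pvRowFold
    simp only [List.foldl_cons, hsrc]
    have hcond : (0:Int) ≤ idx - (i - idx) := by omega
    have heq : idx - (i - idx) = 2 * idx - i := by ring
    by_cases h1 : PySem.List.pyGetD src j 0 = 1
    · rw [if_pos ⟨h1, hcond⟩, if_pos h1, heq]
      rw [pvGetSet_self _ _ _ _ h0 hlen]
    · rw [if_neg (by tauto), if_neg h1]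

-- the row-level fold over range(m) is B's row map (on a row of length ≥ m)
theorem pvRowFold_map (src row : List Int) :
    ∀ (mN : Nat), mN ≤ row.length →
      pvRowFold src (PySem.List.pyRange 0 (mN : Int) 1) row =
        ((PySem.List.pyRange 0 (mN : Int) 1).map (fun j =>
          if PySem.List.pyGetD src j 0 = 1 then 1 else PySem.List.pyGetD row j 0)) ++
          row.drop mN := by
  intro mN
  induction mN with
  | zero =>
    intro _
    rw [PySem.List.pyRange_one_eq_nil (by omega)]
    simp [pvRowFold]
  | succ mN ih =>
    intro hm
    have hlt : mN < row.length := by omega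
    have hcast : ((mN + 1 : Nat) : Int) = (mN : Int) + 1 := by push_cast; ring
    rw [hcast, PySem.List.pyRange_one_succ_right (by omega)]
    unfold pvRowFold
    rw [List.foldl_append, List.map_append]
    have ihe := ih (by omega)
    unfold pvRowFold at ihe
    rw [ihe]
    simp only [List.foldl_cons, List.foldl_nil, List.map_cons, List.map_nil]
    have hdrop : row.drop mN = row[mN] :: row.drop (mN + 1) := List.drop_eq_getElem_cons hlt
    have hgetrow : PySem.List.pyGetD row ((mN : Nat) : Int) 0 = row[mN] := by
      rw [PySem.List.pyGetD_natCast]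
      simp [List.getD, List.getElem?_eq_getElem hlt]
    have hprelen : ((PySem.List.pyRange 0 (mN : Int) 1).map (fun j =>
        if PySem.List.pyGetD src j 0 = 1 then 1 else PySem.List.pyGetD row j 0)).length = mN := by
      rw [List.length_map, PySem.List.length_pyRange_one]; omega
    by_cases h1 : PySem.List.pyGetD src ((mN : Nat) : Int) 0 = 1
    · rw [if_pos h1, if_pos h1]
      rw [PySem.List.pySetD_natCast]
      rw [hdrop, List.set_append]
      simp only [hprelen, lt_irrefl, Nat.sub_self]
      simp
      rw [hdrop]
      rfl
    · rw [if_neg h1, if_neg h1, hdrop, hgetrow]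
      simp

-- B's merged row, with the in-range source condition already known true
def pvMerged (board : List (List Int)) (idx t : Int) (mN : Nat) : List Int :=
  (PySem.List.pyRange 0 (mN : Int) 1).map (fun j =>
    if PySem.List.pyGetD (PySem.List.pyGetD board (2 * idx - t) []) j 0 = 1 then 1
    else PySem.List.pyGetD (PySem.List.pyGetD board t []) j 0)

-- the state of A's board after folding the sources idx+1 .. idx+d
theorem pvMain (board : List (List Int)) (idx : Int) (mN : Nat)
    (h0 : 0 ≤ idx) (hn : idx < (board.length : Int))
    (rect : ∀ row ∈ board, row.length = mN) :
    ∀ (d : Nat), idx + 1 + (d : Int) ≤ (board.length : Int) → ∀ t : Int, 0 ≤ t →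
      PySem.List.pyGetD
        ((PySem.List.pyRange (idx + 1) (idx + 1 + (d : Int)) 1).foldl
          (pvAOuter idx (mN : Int))
          (PySem.List.pySetD board idx (List.replicate mN 2))) t [] =
      if t < idx ∧ 2 * idx - t < idx + 1 + (d : Int) then pvMerged board idx t mN
      else PySem.List.pyGetD (PySem.List.pySetD board idx (List.replicate mN 2)) t [] := by
  intro d
  induction d with
  | zero =>
    intro _ t ht
    rw [PySem.List.pyRange_one_eq_nil (by omega)]
    simp only [List.foldl_nil]
    rw [if_neg (by omega)]
  | succ d ih =>
    intro hd t ht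
    have hcast : idx + 1 + ((d + 1 : Nat) : Int) = (idx + 1 + (d : Int)) + 1 := by
      push_cast; ring
    rw [hcast, PySem.List.pyRange_one_succ_right (by omega), List.foldl_append]
    simp only [List.foldl_cons, List.foldl_nil]
    have hd' : idx + 1 + (d : Int) ≤ (board.length : Int) := by omega
    set i : Int := idx + 1 + (d : Int) with hi
    set b0 : List (List Int) := PySem.List.pySetD board idx (List.replicate mN 2) with hb0
    set bd : List (List Int) :=
      (PySem.List.pyRange (idx + 1) i 1).foldl (pvAOuter idx (mN : Int)) b0 with hbd
    have hlenbd : bd.length = board.length := by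
      rw [hbd, pvFoldl_len _ (fun b x => pvAOuter_len idx (mN : Int) b x), hb0,
        PySem.List.length_pySetD]
    by_cases hteq : t = 2 * idx - i
    · -- t is exactly the row targeted by source i
      have h2 : 0 ≤ 2 * idx - i := by omega
      have hii : idx < i := by omega
      have hsrc : PySem.List.pyGetD bd i [] = PySem.List.pyGetD board i [] := by
        rw [ih hd' i (by omega), if_neg (by omega), hb0]
        exact pvGetSet_other _ _ _ _ _ (by omega) h0 (by omega)
      have hlen2 : (2 * idx - i).toNat < bd.length := by rw [hlenbd]; omega
      have := pvInner_target idx i hii h2 (PySem.List.pyRange 0 (mN : Int) 1) bd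
        (PySem.List.pyGetD board i []) hsrc hlen2
      unfold pvAOuter
      rw [hteq, this]
      have hbdt : PySem.List.pyGetD bd (2 * idx - i) [] =
          PySem.List.pyGetD board (2 * idx - i) [] := by
        rw [ih hd' (2 * idx - i) h2, if_neg (by omega), hb0]
        exact pvGetSet_other _ _ _ _ _ h2 h0 (by omega)
      rw [hbdt]
      have hrow : PySem.List.pyGetD board (2 * idx - i) [] =
          board.getD (2 * idx - i).toNat [] := pvGetD_nonneg _ _ _ h2
      have hmem : board.getD (2 * idx - i).toNat [] ∈ board := by
        have hlt : (2 * idx - i).toNat < board.length := by omega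
        rw [List.getD, List.getElem?_eq_getElem hlt]
        exact List.getElem_mem hlt
      have hrl : (PySem.List.pyGetD board (2 * idx - i) []).length = mN := by
        rw [hrow]; exact rect _ hmem
      rw [pvRowFold_map _ _ mN (by omega)]
      rw [List.drop_eq_nil_of_le (by omega), List.append_nil]
      rw [if_pos (by constructor <;> omega)]
      unfold pvMerged
      have h2i : 2 * idx - (2 * idx - i) = i := by ring
      rw [h2i]
    · -- every other row is unchanged by the step at source i
      unfold pvAOuter
      rw [pvInner_other idx i t ht hteq _ bd, ih hd' t ht]
      have hiff : (t < idx ∧ 2 * idx - t < i + 1) ↔ (t < idx ∧ 2 * idx - t < i) := by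
        omega
      by_cases hc : t < idx ∧ 2 * idx - t < i
      · rw [if_pos hc, if_pos (hiff.mpr hc)]
      · rw [if_neg hc, if_neg (fun h => hc (hiff.mp h))]

-- ===== VERDICT (by name: the statement is the Claim_ definition above) =====
theorem horizfold_spec : Claim_equal_horizfold := by
  intro board idx _ hpre
  unfold Spec_horizfold horizfold horizfold_alt
  by_cases hr : idx < 0 ∨ (board.length : Int) ≤ idx
  · simp only [hr, if_true]
  · simp only [hr, if_false]
    have h0 : 0 ≤ idx := by omega
    have hn : idx < (board.length : Int) := by omega
    obtain ⟨hne, hrect⟩ := hpre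
    set mN : Nat := (PySem.List.pyGetD board 0 []).length with hmN
    have hhead : PySem.List.pyGetD board 0 [] = board.headD [] := by
      cases board with
      | nil => exact absurd rfl hne
      | cons x xs => rw [PySem.List.pyGetD_zero]; rfl
    have rect : ∀ row ∈ board, row.length = mN := by
      intro row hrow
      rw [hmN, hhead]
      exact hrect h0 hn row hrow
    have hmcast : ((PySem.List.pyGetD board 0 []).length : Int).toNat = mN := by
      simp [hmN]
    have hD : idx + 1 + (((board.length : Int) - (idx + 1)).toNat : Int)
        = (board.length : Int) := by omega
    rw [hmcast]
    rw [← hD]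
    apply List.map_congr_left
    intro r hrmem
    have hr01 : 0 ≤ r ∧ r < idx := by
      have := (PySem.List.mem_pyRange_one).mp hrmem
      omega
    rw [pvMain board idx mN h0 hn rect _ (by omega) r hr01.1]
    unfold pvBRow pvMerged
    by_cases hsrc : 2 * idx - r < (board.length : Int)
    · rw [if_pos ⟨hr01.2, by omega⟩]
      apply List.map_congr_left
      intro j _
      simp only [hsrc, true_and]
    · rw [if_neg (by omega)]
      rw [pvGetSet_other _ _ _ _ _ hr01.1 h0 (by omega)]
      have hrow : PySem.List.pyGetD board r [] = board.getD r.toNat [] :=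
        pvGetD_nonneg _ _ _ hr01.1
      have hmem : board.getD r.toNat [] ∈ board := by
        have hlt : r.toNat < board.length := by omega
        rw [List.getD, List.getElem?_eq_getElem hlt]
        exact List.getElem_mem hlt
      have hrl : (PySem.List.pyGetD board r []).length = mN := by
        rw [hrow]; exact rect _ hmem
      have hmap : ∀ j ∈ PySem.List.pyRange 0 (mN : Int) 1,
          (if 2 * idx - r < (board.length : Int) ∧
              PySem.List.pyGetD (PySem.List.pyGetD board (2 * idx - r) []) j 0 = 1
           then (1 : Int) else PySem.List.pyGetD (PySem.List.pyGetD board r []) j 0)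
          = PySem.List.pyGetD (PySem.List.pyGetD board r []) j 0 := by
        intro j _
        rw [if_neg (fun h => hsrc h.1)]
      rw [List.map_congr_left hmap, ← hrl]
      exact (PySem.List.map_pyGetD_pyRange_zero' _ _).symm
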